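-- pv_equiv track=rewrite | github.com/PlayVoice/whisper-vits-svc | icassp2022_vocal_transcription/src/quantization.py | makeSegments
-- ===== SOURCE A (Python) =====
-- def makeSegments(note):
--     """ Make segments of notes
--     ----------
--     Parameters:
--         note: array
--
--     ----------
--     Returns:
--         startSeg: starting points (array)
--         endSeg: ending points (array)
--
--     """
--     startSeg = []
--     endSeg = []
--     flag = -1
--     if note[0] > 0:
--         startSeg.append(0)
--         flag *= -1
--     for i in range(0, len(note) - 1):
--         if note[i] != note[i + 1]:
--             if flag < 0:
--                 startSeg.append(i + 1)
--                 flag *= -1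
--             else:
--                 if note[i + 1] == 0:
--                     endSeg.append(i)
--                     flag *= -1
--                 else:
--                     endSeg.append(i)
--                     startSeg.append(i + 1)
--     return startSeg, endSeg
-- ===== SOURCE B (Python) =====
-- def makeSegments(note):
--     n = len(note)
--     startSeg = ([0] if note[0] != 0 else []) + [
--         i + 1 for i in range(n - 1) if note[i] != note[i + 1] and note[i + 1] != 0
--     ]
--     endSeg = [i for i in range(n - 1) if note[i] != note[i + 1] and note[i] != 0]
--     return startSeg, endSeg
-- ===== Notes on version B (the rewrite author's own statement) =====
-- stated objective: simpler
-- what changed: Replaces the flag-threaded stateful pass with two stateless comprehensions that detect each segment boundary locally from adjacent elements (a run boundary into a nonzero value is a start, out of a nonzero value is an end).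
-- outside the precondition, e.g. on makeSegments([]): A raises IndexError, B raises IndexError; on makeSegments([-1, 0]): A returns ([1], []), B returns ([0], [0]); on makeSegments([-1, -1, 0]): A returns ([2], []), B returns ([0], [1])
import Mathlib
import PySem

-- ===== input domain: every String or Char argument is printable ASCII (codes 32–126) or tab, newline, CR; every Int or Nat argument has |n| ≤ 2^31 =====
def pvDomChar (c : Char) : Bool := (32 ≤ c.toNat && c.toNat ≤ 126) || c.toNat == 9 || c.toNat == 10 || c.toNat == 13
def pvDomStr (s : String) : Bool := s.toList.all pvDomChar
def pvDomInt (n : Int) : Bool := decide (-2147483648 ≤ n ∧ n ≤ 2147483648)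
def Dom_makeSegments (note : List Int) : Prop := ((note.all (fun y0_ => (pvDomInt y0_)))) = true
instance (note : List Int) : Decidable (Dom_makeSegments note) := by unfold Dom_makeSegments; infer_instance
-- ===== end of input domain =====

-- B replaces A's flag-threaded stateful pass by two stateless local-boundary comprehensions (simpler);
-- on a negative first element A's flag state is scrambled, stated as the intended difference D_ below.

-- ===== PORT A =====
-- one loop iteration of A: state is (startSeg, endSeg, flag)
def makeSegmentsStep (note : List Int) (st : List Int × List Int × Int) (i : Nat) :
    List Int × List Int × Int :=
  let (startSeg, endSeg, flag) := st
  if note.getD i 0 ≠ note.getD (i + 1) 0 then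
    if flag < 0 then (startSeg ++ [(i : Int) + 1], endSeg, flag * (-1))
    else if note.getD (i + 1) 0 = 0 then (startSeg, endSeg ++ [(i : Int)], flag * (-1))
    else (startSeg ++ [(i : Int) + 1], endSeg ++ [(i : Int)], flag)
  else (startSeg, endSeg, flag)

def makeSegments (note : List Int) : List Int × List Int :=
  -- note[0] raises IndexError on []; Pre_ excludes the empty list, getD is exact elsewhere
  let init : List Int × List Int × Int :=
    if note.getD 0 0 > 0 then ([0], [], (-1) * (-1)) else ([], [], -1)
  let r := (List.range (note.length - 1)).foldl (makeSegmentsStep note) init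
  (r.1, r.2.1)

-- ===== PORT B =====
def makeSegments_alt (note : List Int) : List Int × List Int :=
  let n := note.length
  let startSeg : List Int :=
    (if note.getD 0 0 ≠ 0 then [(0 : Int)] else []) ++
      (List.range (n - 1)).filterMap (fun i =>
        if note.getD i 0 ≠ note.getD (i + 1) 0 ∧ note.getD (i + 1) 0 ≠ 0
        then some ((i : Int) + 1) else none)
  let endSeg : List Int :=
    (List.range (n - 1)).filterMap (fun i =>
      if note.getD i 0 ≠ note.getD (i + 1) 0 ∧ note.getD i 0 ≠ 0
      then some ((i : Int)) else none)
  (startSeg, endSeg)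

-- ===== PRECONDITION & SPEC =====
-- Both A and B read the first element unconditionally, so the empty list raises IndexError in both; Pre_ further
-- restricts to the function's natural domain: note values are MIDI-style nonnegative pitches, so the first
-- element must be nonnegative (A seeds its flag only for a strictly positive first element, and on a negative
-- lead A's flag state and B's uniform nonzero rule give different segmentations — see the cites).
def Pre_makeSegments (note : List Int) : Prop := note ≠ [] ∧ 0 ≤ note.getD 0 0
instance (note : List Int) : Decidable (Pre_makeSegments note) := by
  unfold Pre_makeSegments; infer_instance
def pvWitness_makeSegments : List Int := ([1, 1, 0, 2])

def Spec_makeSegments (note : List Int) (out : List Int × List Int) : Prop :=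
  out = makeSegments_alt note
instance (note : List Int) (out : List Int × List Int) : Decidable (Spec_makeSegments note out) := by
  unfold Spec_makeSegments; infer_instance

-- ===== CLAIM (what is proved, stated in full; the proofs are below) =====
def Claim_equal_makeSegments : Prop := ∀ (note : List Int), Dom_makeSegments note → Pre_makeSegments note → Spec_makeSegments note (makeSegments note)

-- ===== LEMMAS AND PROOFS =====

-- the flag after processing indices 0..k-1, given a nonnegative first element: +1 iff note[k] ≠ 0
def pvFlag (note : List Int) (k : Nat) : Int := if note.getD k 0 = 0 then -1 else 1

-- B's start/end boundary lists restricted to the first k comparisons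
def pvStarts (note : List Int) (k : Nat) : List Int :=
  (if note.getD 0 0 ≠ 0 then [(0 : Int)] else []) ++
    (List.range k).filterMap (fun i =>
      if note.getD i 0 ≠ note.getD (i + 1) 0 ∧ note.getD (i + 1) 0 ≠ 0
      then some ((i : Int) + 1) else none)

def pvEnds (note : List Int) (k : Nat) : List Int :=
  (List.range k).filterMap (fun i =>
    if note.getD i 0 ≠ note.getD (i + 1) 0 ∧ note.getD i 0 ≠ 0
    then some ((i : Int)) else none)

-- one step of A's loop preserves the stateless description of the state
theorem pvStep (note : List Int) (k : Nat) :
    makeSegmentsStep note (pvStarts note k, pvEnds note k, pvFlag note k) k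
    = (pvStarts note (k + 1), pvEnds note (k + 1), pvFlag note (k + 1)) := by
  unfold makeSegmentsStep pvStarts pvEnds pvFlag
  by_cases hne : note[k]?.getD 0 = note[k + 1]?.getD 0
  · simp [List.range_succ, hne]
  · by_cases hk : note[k]?.getD 0 = 0
    · have hk1 : ¬ note[k + 1]?.getD 0 = 0 := fun h => hne (by rw [hk, h])
      have hk1' : ¬ (0 : Int) = note[k + 1]?.getD 0 := fun h => hk1 h.symm
      simp [List.range_succ, hne, hk, hk1, hk1', List.append_assoc]
    · by_cases hk1 : note[k + 1]?.getD 0 = 0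
      · simp [List.range_succ, hne, hk, hk1]
      · simp [List.range_succ, hne, hk, hk1, List.append_assoc]

-- loop invariant of A's pass for a nonnegative first element
theorem pvInvariant (note : List Int) (h0 : 0 ≤ note.getD 0 0) (k : Nat) :
    (List.range k).foldl (makeSegmentsStep note)
      (if note.getD 0 0 > 0 then ([0], [], (-1 : Int) * (-1)) else ([], [], -1))
    = (pvStarts note k, pvEnds note k, pvFlag note k) := by
  induction k with
  | zero =>
    simp only [List.getD_eq_getElem?_getD] at h0 ⊢
    by_cases h : note[0]?.getD 0 = 0
    · have : ¬ note[0]?.getD 0 > 0 := by omega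
      simp [pvStarts, pvEnds, pvFlag, h, this]
    · have : note[0]?.getD 0 > 0 := by omega
      simp [pvStarts, pvEnds, pvFlag, h, this]
  | succ k ih =>
    rw [List.range_succ, List.foldl_append, ih, List.foldl_cons, List.foldl_nil]
    exact pvStep note k

-- ===== VERDICT (by name: the statement is the Claim_ definition above) =====
theorem makeSegments_spec : Claim_equal_makeSegments := by
  intro note _ hpre
  show makeSegments note = makeSegments_alt note
  simp only [makeSegments, makeSegments_alt]
  rw [pvInvariant note hpre.2]
  rfl
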